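-- pv_equiv track=rewrite | github.com/cchristodoulaki/Pytheas | src/pytheas/header_events.py | partially_repeating_values_on_row
-- ===== SOURCE A (Python) =====
-- def get_num_repeating_values(value_idxs):
--     seq_idxs = value_idxs[0:1]
--     for i in value_idxs[1:]:
--         if seq_idxs[-1]+1==i:
--             seq_idxs.append(i)
--         else:
--             break
--     return len(seq_idxs)
--
-- def partially_repeating_values_on_row(row_values):
--     event_occurred = False
--     value_set = set(row_values)
--     repeating_value_seen = False
--     condition_failed = False
--     repeating_lengths = []
--     repeating_seen_list = []
--
--     #for each distinct value
--     for value in value_set: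
--         if value == None or value.strip().lower() in ['',' ','nan','none','null'] or  value.replace('.','',1).isdigit():
--             continue
--
--         repeating_seen = 0
--         value_idxs = [i for i,val in enumerate(row_values) if val==value]
--         repeating_length = get_num_repeating_values(value_idxs)
--         start_idx=0
--         while start_idx+repeating_length<len(value_idxs):
--             start_idx = start_idx+repeating_length
--             next_repeating_length = get_num_repeating_values(value_idxs[start_idx:])
--             if repeating_length!=next_repeating_length:
--                 #it must be repeated with the same length  at least once to be valid
--                 if repeating_seen<1:
--                     condition_failed = True
--                 break
--             else:
--                 repeating_seen+=1
--                 repeating_value_seen = True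
--
--         repeating_seen_list.append(repeating_seen)
--         repeating_lengths.append(repeating_length)
--     if len(repeating_seen_list)>0:
--         max_repeats = max(repeating_seen_list)
--         if condition_failed == False and repeating_value_seen and max(repeating_lengths)>0  and max_repeats>=2 and repeating_seen_list.count(max_repeats)>=2:
--             event_occurred = True
--     else:
--         max_repeats= 0
--         event_occurred = False
--     return event_occurred, repeating_seen_list.count(max_repeats)
-- ===== SOURCE B (Python) =====
-- _SKIP_STRINGS = ('', ' ', 'nan', 'none', 'null')
--
--
-- def _skippable(value):
--     return (value is None
--             or value.strip().lower() in _SKIP_STRINGS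
--             or value.replace('.', '', 1).isdigit())
--
--
-- def _run_lengths(idxs):
--     lengths = []
--     prev = None
--     for i in idxs:
--         if prev is not None and prev + 1 == i:
--             lengths[-1] += 1
--         else:
--             lengths.append(1)
--         prev = i
--     return lengths
--
--
-- def partially_repeating_values_on_row(row_values):
--     # one pass: value -> list of positions where it occurs
--     positions = {}
--     for i, v in enumerate(row_values):
--         positions.setdefault(v, []).append(i)
--     seen_list = []
--     failed = False
--     rep_seen = False
--     for v, idxs in positions.items():
--         if _skippable(v):
--             continue
--         ls = _run_lengths(idxs)
--         l1 = ls[0]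
--         seen = 0
--         for l in ls[1:]:
--             if l != l1:
--                 if seen < 1:
--                     failed = True
--                 break
--             seen += 1
--         if seen > 0:
--             rep_seen = True
--         seen_list.append(seen)
--     if not seen_list:
--         return False, 0
--     m = max(seen_list)
--     c = seen_list.count(m)
--     event = (not failed) and rep_seen and m >= 2 and c >= 2
--     return event, c
-- ===== Notes on version B (the rewrite author's own statement) =====
-- stated objective: faster
-- what changed: A iterates over set(row), rescans the whole row per distinct value and re-derives each run length by repeatedly slicing and rescanning the index list; B makes one pass over the row grouping positions per value in a dict, computes all run lengths of each position list in a single linear sweep, and reads seen/failed directly off that run-length list (A's always-true max(repeating_lengths)>0 guard is dropped).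
import Mathlib
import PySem

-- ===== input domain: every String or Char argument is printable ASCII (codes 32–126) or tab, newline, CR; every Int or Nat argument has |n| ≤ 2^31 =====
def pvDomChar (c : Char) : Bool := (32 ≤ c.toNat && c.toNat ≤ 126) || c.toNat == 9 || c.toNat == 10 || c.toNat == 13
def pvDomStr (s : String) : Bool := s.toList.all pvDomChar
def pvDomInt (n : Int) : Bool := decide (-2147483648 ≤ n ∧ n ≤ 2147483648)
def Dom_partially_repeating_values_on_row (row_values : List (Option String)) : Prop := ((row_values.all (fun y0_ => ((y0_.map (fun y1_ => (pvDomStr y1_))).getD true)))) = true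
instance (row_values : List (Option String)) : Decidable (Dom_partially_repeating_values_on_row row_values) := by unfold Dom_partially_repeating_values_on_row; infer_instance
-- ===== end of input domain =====

-- B replaces A's quadratic per-value slicing scan over set(row) by one pass grouping positions per value
-- and a linear run-length analysis; same return value (return-value equivalence; neither mutates its input).

-- ===== PORT A =====
-- shared skip test: `value == None or value.strip().lower() in ['',' ','nan','none','null'] or value.replace('.','',1).isdigit()`
-- (both Pythons contain this same condition verbatim).
-- `replace('.','',1)` (delete the FIRST '.') has no counted-replace PySem primitive; hand port below,
-- exact for the one-char pattern '.' and empty replacement.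
def pvReplaceDot1 : List Char → List Char
  | [] => []
  | c :: t => if c = '.' then t else c :: pvReplaceDot1 t

def pvSkip (value : Option String) : Bool :=
  match value with
  | none => true
  | some s =>
    let t := PySem.Chars.lower (PySem.Chars.strip s.toList)
    (t == [] || t == [' '] || t == ['n','a','n'] || t == ['n','o','n','e'] || t == ['n','u','l','l'])
      || PySem.Chars.strIsdigit (pvReplaceDot1 s.toList)

-- the for-loop of get_num_repeating_values; the `none` branch is Python's IndexError on seq_idxs[-1],
-- unreachable in A's uses (seq_idxs is nonempty whenever the loop body runs on a nonempty value_idxs)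
def pvGnrvGo (seq_idxs : List Int) : List Int → List Int
  | [] => seq_idxs
  | i :: t =>
    match PySem.List.pyGet? seq_idxs (-1) with
    | some last => if last + 1 = i then pvGnrvGo (seq_idxs ++ [i]) t else seq_idxs
    | none => seq_idxs

def get_num_repeating_values (value_idxs : List Int) : Int :=
  (pvGnrvGo (PySem.List.slice value_idxs (some 0) (some 1)) (PySem.List.slice value_idxs (some 1) none)).length

-- A's while loop; fuel bounds the iteration count (start_idx grows by repeating_length ≥ 1 each turn)
def pvWhileA (value_idxs : List Int) (repeating_length : Int) :
    Nat → Int → Int → Bool → Bool → Int × Bool × Bool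
  | 0, _, repeating_seen, cf, rvs => (repeating_seen, cf, rvs)
  | fuel + 1, start_idx, repeating_seen, cf, rvs =>
    if start_idx + repeating_length < (value_idxs.length : Int) then
      let start_idx' := start_idx + repeating_length
      let nrl := get_num_repeating_values (PySem.List.slice value_idxs (some start_idx') none)
      if repeating_length ≠ nrl then
        (repeating_seen, if repeating_seen < 1 then true else cf, rvs)
      else
        pvWhileA value_idxs repeating_length fuel start_idx' (repeating_seen + 1) cf true
    else (repeating_seen, cf, rvs)

-- one iteration of A's `for value in value_set` loop; state = (repeating_value_seen, condition_failed,
-- repeating_lengths, repeating_seen_list)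
def pvRowStep (row_values : List (Option String))
    (st : Bool × Bool × List Int × List Int) (value : Option String) :
    Bool × Bool × List Int × List Int :=
  if pvSkip value then st else
  let value_idxs := (PySem.List.enumerate row_values 0).filterMap
      (fun p => if p.2 == value then some p.1 else none)
  let rl := get_num_repeating_values value_idxs
  let r := pvWhileA value_idxs rl (value_idxs.length + 1) 0 0 st.2.1 st.1
  (r.2.2, r.2.1, st.2.2.1 ++ [rl], st.2.2.2 ++ [r.1])

def partially_repeating_values_on_row (row_values : List (Option String)) : Bool × Int :=
  let value_set := PySem.Set.ofList row_values
  let st := value_set.foldl (pvRowStep row_values) (false, false, ([] : List Int), ([] : List Int))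
  let seens := st.2.2.2
  if 0 < seens.length then
    let max_repeats := (PySem.List.max? seens (fun x => x)).getD 0
    let event := (st.2.1 == false) && st.1 &&
      decide (0 < (PySem.List.max? st.2.2.1 (fun x => x)).getD 0) &&
      decide (2 ≤ max_repeats) && decide (2 ≤ (PySem.List.count seens max_repeats : Int))
    (event, (PySem.List.count seens max_repeats : Int))
  else (false, (PySem.List.count seens 0 : Int))

-- ===== PORT B =====
-- one pass over enumerate(row_values): positions.setdefault(v, []).append(i), i.e. d[v] = d.get(v, []) + [i]
def pvPositions (row_values : List (Option String)) : PySem.Dict (Option String) (List Int) :=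
  (PySem.List.enumerate row_values 0).foldl
    (fun d p => d.modify p.2 [] (fun cur => cur ++ [p.1])) PySem.Dict.empty

-- _run_lengths: lengths of the maximal runs of consecutive indices
def pvRunAux (prev c : Int) : List Int → List Int
  | [] => [c]
  | y :: t => if prev + 1 = y then pvRunAux y (c + 1) t else c :: pvRunAux y 1 t

def pvRunLengths : List Int → List Int
  | [] => []
  | x :: t => pvRunAux x 1 t

-- B's inner `for l in ls[1:]` loop; returns (seen, whether this value tripped `failed`)
def pvSeenLoop (l1 : Int) : List Int → Int → Int × Bool
  | [], seen => (seen, false)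
  | l :: t, seen => if l ≠ l1 then (seen, decide (seen < 1)) else pvSeenLoop l1 t (seen + 1)

-- one iteration of B's loop over positions.items(); state = (seen_list, failed, rep_seen)
def pvAltStep (st : List Int × Bool × Bool) (p : Option String × List Int) : List Int × Bool × Bool :=
  if pvSkip p.1 then st else
  let ls := pvRunLengths p.2
  let l1 := ls.headD 0   -- ls[0]; position lists built by pvPositions are never empty
  let r := pvSeenLoop l1 ls.tail 0
  (st.1 ++ [r.1], st.2.1 || r.2, st.2.2 || decide (0 < r.1))

def partially_repeating_values_on_row_alt (row_values : List (Option String)) : Bool × Int :=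
  let st := (pvPositions row_values).items.foldl pvAltStep ([], false, false)
  let seens := st.1
  if seens.isEmpty then (false, 0)
  else
    let m := (PySem.List.max? seens (fun x => x)).getD 0
    let c := (PySem.List.count seens m : Int)
    ((!st.2.1) && st.2.2 && decide (2 ≤ m) && decide (2 ≤ c), c)

-- ===== PRECONDITION & SPEC =====
def Spec_partially_repeating_values_on_row (row_values : List (Option String)) (out : Bool × Int) : Prop := out = partially_repeating_values_on_row_alt row_values
instance (row_values : List (Option String)) (out : Bool × Int) : Decidable (Spec_partially_repeating_values_on_row row_values out) := by unfold Spec_partially_repeating_values_on_row; infer_instance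

-- ===== CLAIM (what is proved, stated in full; the proofs are below) =====
def Claim_equal_partially_repeating_values_on_row : Prop := ∀ (row_values : List (Option String)), Dom_partially_repeating_values_on_row row_values → Spec_partially_repeating_values_on_row row_values (partially_repeating_values_on_row row_values)

-- ===== LEMMAS AND PROOFS =====

-- length of the initial run continuing prev, prev+1, …
def pvChainLen (prev : Int) : List Int → Nat
  | [] => 0
  | y :: t => if prev + 1 = y then pvChainLen y t + 1 else 0

-- A's value_idxs for a given value (the comprehension over enumerate)
def pvIdxsOf (row_values : List (Option String)) (value : Option String) : List Int :=
  (PySem.List.enumerate row_values 0).filterMap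
      (fun p => if p.2 == value then some p.1 else none)

theorem pvPyGet_neg_one (acc : List Int) (h : acc ≠ []) :
    PySem.List.pyGet? acc (-1) = acc.getLast? := by
  have hl : 0 < acc.length := List.length_pos_iff.mpr h
  simp [PySem.List.pyGet?, PySem.List.pyIdx?]
  rw [if_pos (by omega : 1 ≤ acc.length)]
  simp [List.getLast?_eq_getElem?]

theorem pvGnrvGo_length (rest : List Int) : ∀ (acc : List Int) (prev : Int), acc ≠ [] →
    acc.getLast? = some prev →
    (pvGnrvGo acc rest).length = acc.length + pvChainLen prev rest := by
  induction rest with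
  | nil => intro acc prev h hl; simp [pvGnrvGo, pvChainLen]
  | cons i t ih =>
    intro acc prev h hl
    rw [pvGnrvGo, pvPyGet_neg_one acc h, hl]
    simp only [pvChainLen]
    by_cases hc : prev + 1 = i
    · rw [if_pos hc, if_pos hc, ih (acc ++ [i]) i (by simp) (by simp)]
      simp; omega
    · rw [if_neg hc, if_neg hc]; simp

theorem pvGnrv_cons (x : Int) (t : List Int) :
    get_num_repeating_values (x :: t) = 1 + (pvChainLen x t : Int) := by
  have h1 : PySem.List.slice (x :: t) (some 0) (some 1) = [x] := by
    simp [pysem]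
  have h2 : PySem.List.slice (x :: t) (some 1) none = t := by
    simp [pysem]
  rw [get_num_repeating_values, h1, h2,
      pvGnrvGo_length t [x] x (by simp) (by simp)]
  simp

theorem pvRunAux_eq (rest : List Int) : ∀ (prev c : Int),
    pvRunAux prev c rest
      = (c + (pvChainLen prev rest : Int)) :: pvRunLengths (rest.drop (pvChainLen prev rest)) := by
  induction rest with
  | nil => intro prev c; simp [pvRunAux, pvChainLen, pvRunLengths]
  | cons y t ih =>
    intro prev c
    simp only [pvRunAux, pvChainLen]
    by_cases hc : prev + 1 = y
    · rw [if_pos hc, if_pos hc, ih y (c + 1)]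
      rw [List.drop_succ_cons]
      congr 1
      push_cast; ring
    · rw [if_neg hc, if_neg hc]
      simp [pvRunLengths]

theorem pvRunAux_pos (rest : List Int) : ∀ (prev c : Int), 1 ≤ c →
    ∀ x ∈ pvRunAux prev c rest, 1 ≤ x := by
  induction rest with
  | nil => intro prev c hc x hx; simp [pvRunAux] at hx; omega
  | cons y t ih =>
    intro prev c hc x hx
    simp only [pvRunAux] at hx
    by_cases hcc : prev + 1 = y
    · rw [if_pos hcc] at hx; exact ih y (c + 1) (by omega) x hx
    · rw [if_neg hcc] at hx
      rcases List.mem_cons.mp hx with h | h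
      · omega
      · exact ih y 1 (by omega) x h

theorem pvRunAux_sum (rest : List Int) : ∀ (prev c : Int),
    (pvRunAux prev c rest).sum = c + rest.length := by
  induction rest with
  | nil => intro prev c; simp [pvRunAux]
  | cons y t ih =>
    intro prev c
    simp only [pvRunAux]
    by_cases hc : prev + 1 = y
    · rw [if_pos hc, ih y (c + 1)]; simp; ring
    · rw [if_neg hc]; simp [ih y 1]; ring

theorem pvRunLengths_pos (l : List Int) : ∀ x ∈ pvRunLengths l, 1 ≤ x := by
  cases l with
  | nil => simp [pvRunLengths]
  | cons x t => exact pvRunAux_pos t x 1 (by omega)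

theorem pvRunLengths_sum (l : List Int) : (pvRunLengths l).sum = l.length := by
  cases l with
  | nil => simp [pvRunLengths]
  | cons x t => rw [pvRunLengths, pvRunAux_sum t x 1]; simp; ring

theorem pvSeenLoop_le (rest : List Int) : ∀ (l1 seen : Int), seen ≤ (pvSeenLoop l1 rest seen).1 := by
  induction rest with
  | nil => intro l1 seen; simp [pvSeenLoop]
  | cons l t ih =>
    intro l1 seen
    simp only [pvSeenLoop]
    by_cases hc : l ≠ l1
    · rw [if_pos hc]
    · rw [if_neg hc]
      have := ih l1 (seen + 1)
      omega

theorem pvSum_ge_len (l : List Int) (h : ∀ x ∈ l, 1 ≤ x) : (l.length : Int) ≤ l.sum := by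
  induction l with
  | nil => simp
  | cons x t ih =>
    simp only [List.length_cons, List.sum_cons]
    have h1 : 1 ≤ x := h x (List.mem_cons_self)
    have h2 := ih (fun y hy => h y (List.mem_cons_of_mem _ hy))
    push_cast
    omega

theorem pvChainLen_le (l : List Int) : ∀ prev : Int, pvChainLen prev l ≤ l.length := by
  induction l with
  | nil => intro prev; simp [pvChainLen]
  | cons y t ih =>
    intro prev
    simp only [pvChainLen, List.length_cons]
    by_cases hc : prev + 1 = y
    · rw [if_pos hc]; have := ih y; omega
    · rw [if_neg hc]; omega

theorem pvWhileA_eq (fuel : Nat) :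
    ∀ (full suffix : List Int) (rl start seen : Int) (cf rvs : Bool),
    0 ≤ start → full.drop start.toNat = suffix → start.toNat + suffix.length = full.length →
    1 ≤ rl → (pvRunLengths suffix).head? = some rl ∨ suffix = [] →
    suffix.length ≤ fuel →
    pvWhileA full rl fuel start seen cf rvs =
      ((pvSeenLoop rl (pvRunLengths suffix).tail seen).1,
       cf || (pvSeenLoop rl (pvRunLengths suffix).tail seen).2,
       rvs || decide (seen < (pvSeenLoop rl (pvRunLengths suffix).tail seen).1)) := by
  induction fuel with
  | zero =>
    intro full suffix rl start seen cf rvs h0 hdrop hlen hrl hhead hfuel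
    have hs : suffix = [] := List.eq_nil_of_length_eq_zero (by omega)
    subst hs
    simp [pvWhileA, pvRunLengths, pvSeenLoop]
  | succ fuel ih =>
    intro full suffix rl start seen cf rvs h0 hdrop hlen hrl hhead hfuel
    have hstart : (start.toNat : Int) = start := Int.toNat_of_nonneg h0
    cases suffix with
    | nil =>
      simp only [pvWhileA]
      rw [if_neg (by simp at hlen; omega)]
      simp [pvRunLengths, pvSeenLoop]
    | cons x t =>
      rcases hhead with hhead | hnil; swap; · exact absurd hnil (by simp)
      have hRA := pvRunAux_eq t x 1
      have hrleq : pvRunLengths (x :: t) = (1 + (pvChainLen x t : Int)) :: pvRunLengths (t.drop (pvChainLen x t)) := by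
        rw [pvRunLengths]; exact hRA
      set cl := pvChainLen x t with hcl
      set rest := pvRunLengths (t.drop cl) with hrest
      have hrlval : rl = 1 + (cl : Int) := by
        rw [hrleq] at hhead; simp at hhead; omega
      have hsum : rest.sum = (t.length : Int) - cl := by
        have hs := pvRunLengths_sum (x :: t)
        rw [hrleq] at hs
        simp at hs
        omega
      have hclle : cl ≤ t.length := pvChainLen_le t x
      have htail : (pvRunLengths (x :: t)).tail = rest := by rw [hrleq]; rfl
      cases hrc : rest with
      | nil =>
        simp only [pvWhileA]
        rw [if_neg (by
          rw [hrc] at hsum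
          simp at hsum
          have hlen2 : start.toNat + (t.length + 1) = full.length := by simpa using hlen
          omega)]
        rw [htail, hrc]
        simp [pvSeenLoop]
      | cons c rest2 =>
        have hrestpos : ∀ y ∈ rest, 1 ≤ y := by
          rw [hrest]; exact pvRunLengths_pos _
        have hrsum : (rest.length : Int) ≤ rest.sum := pvSum_ge_len rest hrestpos
        have hc1 : 1 ≤ c := hrestpos c (by rw [hrc]; exact List.mem_cons_self)
        rw [hrc] at hsum hrsum
        simp at hsum hrsum
        have hlen2 : start.toNat + (t.length + 1) = full.length := by simpa using hlen
        have hcond : start + rl < (full.length : Int) := by omega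
        simp only [pvWhileA]
        rw [if_pos hcond]
        -- the slice is the next suffix
        have hdrop' : full.drop (start + rl).toNat = t.drop cl := by
          have h1 : (start + rl).toNat = start.toNat + (1 + cl) := by omega
          rw [h1, ← List.drop_drop, hdrop, Nat.add_comm 1 cl, List.drop_succ_cons]
        have hslice : PySem.List.slice full (some (start + rl)) none = t.drop cl := by
          rw [PySem.List.slice_from full (by omega), hdrop']
        have hsufne : t.drop cl ≠ [] := by
          intro hdn
          have h3 : pvRunLengths (t.drop cl) = c :: rest2 := by rw [← hrest, hrc]
          rw [hdn] at h3
          simp [pvRunLengths] at h3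
        obtain ⟨y, t', hyt⟩ : ∃ y t', t.drop cl = y :: t' := by
          cases h : t.drop cl with
          | nil => exact absurd h hsufne
          | cons a b => exact ⟨a, b, rfl⟩
        have hnrl : get_num_repeating_values (t.drop cl) = c := by
          rw [hyt, pvGnrv_cons]
          have : pvRunLengths (y :: t') = c :: rest2 := by rw [← hyt, ← hrest, hrc]
          rw [pvRunLengths, pvRunAux_eq] at this
          simp at this
          omega
        rw [hslice, hnrl, htail, hrc]
        by_cases heq : rl = c
        · rw [if_neg (by omega)]
          have hlen' : (start + rl).toNat + (t.drop cl).length = full.length := by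
            have h1 : (start + rl).toNat = start.toNat + (1 + cl) := by omega
            simp at hlen
            rw [h1, List.length_drop]
            omega
          have := ih full (t.drop cl) rl (start + rl) (seen + 1) cf true (by omega)
            hdrop' hlen' hrl (Or.inl (by rw [← hrest, hrc, heq]; rfl))
            (by rw [List.length_drop]; simp at hfuel; omega)
          rw [this]
          have htail' : (pvRunLengths (t.drop cl)).tail = rest2 := by rw [← hrest, hrc]; rfl
          rw [htail']
          have hsl : pvSeenLoop rl (c :: rest2) seen = pvSeenLoop rl rest2 (seen + 1) := by
            rw [pvSeenLoop, if_neg (by omega)]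
          rw [hsl]
          have hle := pvSeenLoop_le rest2 rl (seen + 1)
          simp
          omega
        · rw [if_pos (by omega)]
          have hsl : pvSeenLoop rl (c :: rest2) seen = (seen, decide (seen < 1)) := by
            rw [pvSeenLoop, if_pos (by omega)]
          rw [hsl]
          by_cases hs1 : seen < 1
          · simp [hs1]
          · simp [hs1]


theorem pvPerValue (idxs : List Int) (cf rvs : Bool) :
    pvWhileA idxs (get_num_repeating_values idxs) (idxs.length + 1) 0 0 cf rvs
      = ((pvSeenLoop ((pvRunLengths idxs).headD 0) (pvRunLengths idxs).tail 0).1,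
         cf || (pvSeenLoop ((pvRunLengths idxs).headD 0) (pvRunLengths idxs).tail 0).2,
         rvs || decide (0 < (pvSeenLoop ((pvRunLengths idxs).headD 0) (pvRunLengths idxs).tail 0).1)) := by
  cases idxs with
  | nil =>
    show pvWhileA [] (get_num_repeating_values []) 1 0 0 cf rvs = _
    have hg : get_num_repeating_values [] = 0 := rfl
    rw [hg]
    simp [pvWhileA, pvRunLengths, pvSeenLoop]
  | cons x t =>
    have hg := pvGnrv_cons x t
    have hrleq : pvRunLengths (x :: t)
        = (1 + (pvChainLen x t : Int)) :: pvRunLengths (t.drop (pvChainLen x t)) := by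
      rw [pvRunLengths]; exact pvRunAux_eq t x 1
    have hheadD : (pvRunLengths (x :: t)).headD 0 = get_num_repeating_values (x :: t) := by
      rw [hrleq, hg]; rfl
    rw [hheadD]
    exact pvWhileA_eq ((x :: t).length + 1) (x :: t) (x :: t)
      (get_num_repeating_values (x :: t)) 0 0 cf rvs le_rfl (by simp) (by simp)
      (by rw [hg]; omega) (Or.inl (by rw [hrleq, hg]; rfl)) (by simp)

theorem pvGnrv_pos (idxs : List Int) (h : idxs ≠ []) : 1 ≤ get_num_repeating_values idxs := by
  cases idxs with
  | nil => exact absurd rfl h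
  | cons x t => rw [pvGnrv_cons]; omega

theorem pvIdxsOf_ne_nil (row : List (Option String)) (v : Option String) (h : v ∈ row) :
    pvIdxsOf row v ≠ [] := by
  obtain ⟨k, hk, hv⟩ := List.mem_iff_getElem.mp h
  intro hnil
  have hmem : ((0 : Int) + k, v) ∈ PySem.List.enumerate row 0 := by
    rw [PySem.List.mem_enumerate_iff]
    exact ⟨k, hk, by rw [hv]⟩
  have hk2 : (k : Int) ∈ pvIdxsOf row v := by
    unfold pvIdxsOf
    apply List.mem_filterMap.mpr
    exact ⟨((0 : Int) + k, v), hmem, by simp⟩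
  rw [hnil] at hk2
  simp at hk2

theorem pvPositions_items (row : List (Option String)) :
    (pvPositions row).items = (PySem.Set.ofList row).map (fun v => (v, pvIdxsOf row v)) := by
  have hnd : (pvPositions row).keys.Nodup := by
    unfold pvPositions
    exact PySem.Dict.nodup_keys_foldl_modify_key _ _ _ _ _ PySem.Dict.nodup_keys_empty
  have hkeys : (pvPositions row).keys = PySem.Set.ofList row := by
    unfold pvPositions
    rw [PySem.Dict.keys_foldl_modify_key]
    rw [PySem.Dict.keys_empty, PySem.Set.update_nil_left, PySem.List.map_snd_enumerate]
  have hgetD : ∀ v, (pvPositions row).getD v [] = pvIdxsOf row v := by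
    intro v
    unfold pvPositions pvIdxsOf
    rw [show (PySem.List.enumerate row 0).foldl
          (fun d p => d.modify p.2 [] (fun cur => cur ++ [p.1])) PySem.Dict.empty
        = ((PySem.List.enumerate row 0).map (fun p => (p.2, p.1))).foldl
          (fun d q => d.modify q.1 [] (fun cur => cur ++ [q.2])) PySem.Dict.empty
        from by rw [List.foldl_map]]
    rw [PySem.Dict.getD_foldl_modify_append]
    rw [PySem.Dict.getD_empty]
    rw [List.filter_map]
    rw [List.map_map]
    induction PySem.List.enumerate row 0 with
    | nil => rfl
    | cons p l ihl =>
      by_cases hp : p.2 == v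
      · simp only [List.filterMap_cons, List.filter_cons, Function.comp_apply, hp,
          if_pos, List.map_cons] at ihl ⊢
        rw [← ihl]; rfl
      · simp only [List.filterMap_cons, List.filter_cons, Function.comp_apply] at ihl ⊢
        rw [if_neg (by simpa using hp)]
        simp only [hp, Bool.false_eq_true, if_false]  -- filter drops p
        rw [← ihl]
  rw [PySem.Dict.items_eq_map_keys _ hnd [], hkeys]
  exact List.map_congr_left (fun v hv => by rw [hgetD v])

theorem pvFoldInv (vs : List (Option String)) (row : List (Option String))
    (hvs : ∀ v ∈ vs, v ∈ row) :
    ∀ (rvs cf : Bool) (lengths seens : List Int), (∀ x ∈ lengths, 1 ≤ x) →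
    lengths.length = seens.length →
    (vs.foldl (pvRowStep row) (rvs, cf, lengths, seens)).1
        = (vs.foldl (fun st v => pvAltStep st (v, pvIdxsOf row v)) (seens, cf, rvs)).2.2 ∧
    (vs.foldl (pvRowStep row) (rvs, cf, lengths, seens)).2.1
        = (vs.foldl (fun st v => pvAltStep st (v, pvIdxsOf row v)) (seens, cf, rvs)).2.1 ∧
    (vs.foldl (pvRowStep row) (rvs, cf, lengths, seens)).2.2.2
        = (vs.foldl (fun st v => pvAltStep st (v, pvIdxsOf row v)) (seens, cf, rvs)).1 ∧
    (∀ x ∈ (vs.foldl (pvRowStep row) (rvs, cf, lengths, seens)).2.2.1, 1 ≤ x) ∧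
    (vs.foldl (pvRowStep row) (rvs, cf, lengths, seens)).2.2.1.length
        = (vs.foldl (pvRowStep row) (rvs, cf, lengths, seens)).2.2.2.length := by
  induction vs with
  | nil => intro rvs cf lengths seens hpos hlen; exact ⟨rfl, rfl, rfl, hpos, hlen⟩
  | cons v vs ih =>
    intro rvs cf lengths seens hpos hlen
    have hvrow : v ∈ row := hvs v List.mem_cons_self
    have hvs' : ∀ w ∈ vs, w ∈ row := fun w hw => hvs w (List.mem_cons_of_mem _ hw)
    simp only [List.foldl_cons]
    by_cases hskip : pvSkip v
    · rw [show pvRowStep row (rvs, cf, lengths, seens) v = (rvs, cf, lengths, seens) from by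
        rw [pvRowStep, if_pos hskip]]
      rw [show pvAltStep (seens, cf, rvs) (v, pvIdxsOf row v) = (seens, cf, rvs) from by
        rw [pvAltStep, if_pos hskip]]
      exact ih hvs' rvs cf lengths seens hpos hlen
    · have hne : pvIdxsOf row v ≠ [] := pvIdxsOf_ne_nil row v hvrow
      have hrlpos : 1 ≤ get_num_repeating_values (pvIdxsOf row v) := pvGnrv_pos _ hne
      have hA : pvRowStep row (rvs, cf, lengths, seens) v =
          ((rvs || decide (0 < (pvSeenLoop ((pvRunLengths (pvIdxsOf row v)).headD 0)
              (pvRunLengths (pvIdxsOf row v)).tail 0).1)),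
           (cf || (pvSeenLoop ((pvRunLengths (pvIdxsOf row v)).headD 0)
              (pvRunLengths (pvIdxsOf row v)).tail 0).2),
           lengths ++ [get_num_repeating_values (pvIdxsOf row v)],
           seens ++ [(pvSeenLoop ((pvRunLengths (pvIdxsOf row v)).headD 0)
              (pvRunLengths (pvIdxsOf row v)).tail 0).1]) := by
        rw [pvRowStep, if_neg hskip]
        have hIdx : (PySem.List.enumerate row 0).filterMap
            (fun p => if p.2 == v then some p.1 else none) = pvIdxsOf row v := rfl
        simp only [hIdx]
        rw [pvPerValue (pvIdxsOf row v) cf rvs]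
      have hB : pvAltStep (seens, cf, rvs) (v, pvIdxsOf row v) =
          (seens ++ [(pvSeenLoop ((pvRunLengths (pvIdxsOf row v)).headD 0)
              (pvRunLengths (pvIdxsOf row v)).tail 0).1],
           (cf || (pvSeenLoop ((pvRunLengths (pvIdxsOf row v)).headD 0)
              (pvRunLengths (pvIdxsOf row v)).tail 0).2),
           (rvs || decide (0 < (pvSeenLoop ((pvRunLengths (pvIdxsOf row v)).headD 0)
              (pvRunLengths (pvIdxsOf row v)).tail 0).1))) := by
        rw [pvAltStep, if_neg hskip]
      rw [hA, hB]
      refine ih hvs' _ _ _ _ ?_ ?_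
      · intro x hx
        rcases List.mem_append.mp hx with h1 | h1
        · exact hpos x h1
        · simp at h1; omega
      · simp [hlen]

-- ===== VERDICT (by name: the statement is the Claim_ definition above) =====
theorem partially_repeating_values_on_row_spec : Claim_equal_partially_repeating_values_on_row := by
  intro row _hdom
  unfold Spec_partially_repeating_values_on_row
  unfold partially_repeating_values_on_row partially_repeating_values_on_row_alt
  rw [pvPositions_items row, List.foldl_map]
  dsimp only []
  obtain ⟨h1, h2, h3, h4, h5⟩ := pvFoldInv (PySem.Set.ofList row) row
    (fun v hv => (PySem.Set.mem_ofList row v).mp hv) false false [] [] (by simp) rfl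
  set stA := (PySem.Set.ofList row).foldl (pvRowStep row) (false, false, ([] : List Int), ([] : List Int)) with hstA
  set stB := (PySem.Set.ofList row).foldl (fun st v => pvAltStep st (v, pvIdxsOf row v)) (([] : List Int), false, false) with hstB
  rw [← h1, ← h2, ← h3]
  by_cases hemp : stA.2.2.2 = []
  · rw [hemp]
    simp [PySem.List.count]
  · rw [if_pos (by simp [List.length_pos_iff, hemp])]
    rw [if_neg (by simpa [List.isEmpty_iff] using hemp)]
    have hlne : stA.2.2.1 ≠ [] := by
      intro h
      apply hemp
      apply List.eq_nil_of_length_eq_zero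
      rw [← h5, h]
      rfl
    obtain ⟨mx, hmx⟩ : ∃ mx, PySem.List.max? stA.2.2.1 (fun x => x) = some mx := by
      cases h : PySem.List.max? stA.2.2.1 (fun x => x) with
      | none => exact absurd ((PySem.List.max?_eq_none_iff _ _).mp h) hlne
      | some mx => exact ⟨mx, rfl⟩
    have hmxpos : 1 ≤ mx := h4 mx (PySem.List.max?_mem hmx)
    rw [hmx]
    have hmid : decide (0 < (some mx).getD 0) = true := by simp; omega
    rw [hmid]
    cases stA.2.1 <;> simp
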